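-- pv_equiv track=rewrite | github.com/JuanDM93/emtech-ds-lifestore | backend/globals.py | get_years
-- ===== SOURCE A (Python) =====
-- def get_years(data: list) -> list:
--     """
--     returns: ordered year list from sales data
--     """
--     years = []
--     for d in data:
--         y = d[-1][-1]
--         if y not in years:
--             years.append(y)
--     years.sort(reverse=True)
--     return years
-- ===== SOURCE B (Python) =====
-- def get_years(data: list) -> list:
--     """
--     returns: ordered year list from sales data
--     """
--     ys = sorted((d[-1][-1] for d in data), reverse=True)
--     result = []
--     for y in ys:
--         if not result or result[-1] != y:
--             result.append(y)
--     return result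
-- ===== Notes on version B (the rewrite author's own statement) =====
-- stated objective: alternative
-- what changed: Replaces the membership-test dedup loop followed by an in-place sort with extracting all years, sorting the full list descending once, and collapsing adjacent duplicates in a single pass.
import Mathlib
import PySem

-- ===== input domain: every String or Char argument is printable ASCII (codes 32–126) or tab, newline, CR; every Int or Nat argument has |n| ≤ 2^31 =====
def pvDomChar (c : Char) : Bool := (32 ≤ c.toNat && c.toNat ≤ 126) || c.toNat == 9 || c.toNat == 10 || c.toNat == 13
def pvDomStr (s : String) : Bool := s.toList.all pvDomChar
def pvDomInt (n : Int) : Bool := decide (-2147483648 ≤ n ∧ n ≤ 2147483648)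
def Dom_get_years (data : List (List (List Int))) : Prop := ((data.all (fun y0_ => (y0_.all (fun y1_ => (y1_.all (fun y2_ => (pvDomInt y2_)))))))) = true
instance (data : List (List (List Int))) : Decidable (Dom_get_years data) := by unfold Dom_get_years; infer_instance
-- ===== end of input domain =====

-- B extracts every year, sorts the whole list descending once, and collapses adjacent
-- duplicates in a single pass, instead of A's membership-test dedup loop followed by a sort.


-- ===== PORT A =====
def get_years (data : List (List (List Int))) : List Int :=
  let years := data.foldl (fun acc d =>
    match (PySem.List.pyGet? d (-1)).bind (fun r => PySem.List.pyGet? r (-1)) with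
    | some y => if y ∈ acc then acc else acc ++ [y]
    | none => acc) []   -- `none` means Python's d[-1][-1] raises IndexError; excluded by Pre_
  PySem.List.sorted years (fun x => x) true

-- ===== PORT B =====
def get_years_alt (data : List (List (List Int))) : List Int :=
  let ys := PySem.List.sorted
    (data.map (fun d => ((PySem.List.pyGet? d (-1)).bind (fun r => PySem.List.pyGet? r (-1))).getD 0))
    (fun x => x) true
  ys.foldl (fun result y =>
    match PySem.List.pyGet? result (-1) with
    | none => result ++ [y]
    | some l => if l ≠ y then result ++ [y] else result) []

-- ===== PRECONDITION & SPEC =====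
-- Pre_ excludes inputs where some sale record or that record's last row is empty,
-- on which Python's d[-1][-1] raises IndexError (in A and in B alike).
def Pre_get_years (data : List (List (List Int))) : Prop :=
  ∀ d ∈ data, d ≠ [] ∧ d.getLastD [] ≠ []
instance (data : List (List (List Int))) : Decidable (Pre_get_years data) := by unfold Pre_get_years; infer_instance
def pvWitness_get_years : List (List (List Int)) := [[[2019, 5]], [[2020]], [[3, 2019]]]
def Spec_get_years (data : List (List (List Int))) (out : List Int) : Prop := out = get_years_alt data
instance (data : List (List (List Int))) (out : List Int) : Decidable (Spec_get_years data out) := by unfold Spec_get_years; infer_instance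

-- ===== CLAIM (what is proved, stated in full; the proofs are below) =====
def Claim_equal_get_years : Prop := ∀ (data : List (List (List Int))), Dom_get_years data → Pre_get_years data → Spec_get_years data (get_years data)

-- ===== LEMMAS AND PROOFS =====

-- xs[-1] is xs.getLast?
theorem pyGet_neg_one {α : Type} (xs : List α) : PySem.List.pyGet? xs (-1) = xs.getLast? := by
  cases xs with
  | nil => rfl
  | cons a t =>
    simp [PySem.List.pyGet?, PySem.List.pyIdx?, List.getLast?_eq_getElem?]

-- reverse sort with the identity key is the plain sort with the negated key
theorem sorted_rev_eq_neg (xs : List Int) :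
    PySem.List.sorted xs (fun x => x) true = PySem.List.sorted xs (fun x => -x) false := by
  unfold PySem.List.sorted
  simp only [Bool.false_eq_true, if_false, if_true]
  rw [show (fun a b : Int => decide ((fun x : Int => -x) a < (fun x : Int => -x) b))
      = (fun a b : Int => decide ((fun x : Int => x) b < (fun x : Int => x) a)) from
    funext fun a => funext fun b => by simp only [decide_eq_decide]; omega]

-- the year both programs extract from a record (d[-1][-1], with 0 standing in for IndexError)
def extY (d : List (List Int)) : Int :=
  ((PySem.List.pyGet? d (-1)).bind (fun r => PySem.List.pyGet? r (-1))).getD 0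

theorem extY_some (d : List (List Int)) (h1 : d ≠ []) (h2 : d.getLastD [] ≠ []) :
    (PySem.List.pyGet? d (-1)).bind (fun r => PySem.List.pyGet? r (-1)) = some (extY d) := by
  obtain ⟨r, hr⟩ := Option.isSome_iff_exists.mp (List.getLast?_isSome.mpr h1)
  have hrne : r ≠ [] := by
    rw [List.getLastD_eq_getLast?, hr] at h2
    simpa using h2
  obtain ⟨y, hy⟩ := Option.isSome_iff_exists.mp (List.getLast?_isSome.mpr hrne)
  simp [extY, pyGet_neg_one, hr, hy]

-- A's dedup loop builds exactly set(years-in-order) under Pre_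
theorem foldA_eq (data : List (List (List Int))) (h : Pre_get_years data) :
    data.foldl (fun acc d =>
      match (PySem.List.pyGet? d (-1)).bind (fun r => PySem.List.pyGet? r (-1)) with
      | some y => if y ∈ acc then acc else acc ++ [y]
      | none => acc) []
    = PySem.Set.ofList (data.map extY) := by
  rw [PySem.Set.ofList_eq_foldl, List.foldl_map]
  refine PySem.List.foldl_congr_mem _ _ _ _ ?_
  intro acc d hd
  rw [extY_some d (h d hd).1 (h d hd).2]
  simp only [PySem.Set.add]
  split_ifs with h1 h2 h2 <;> simp_all

-- B's collapse step
def cstep (result : List Int) (y : Int) : List Int :=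
  match PySem.List.pyGet? result (-1) with
  | none => result ++ [y]
  | some l => if l ≠ y then result ++ [y] else result

-- the last element of a strictly decreasing list is a lower bound
theorem last_lb (l : List Int) (h : l.Pairwise (· > ·)) (a : Int) (ha : a ∈ l)
    (x : Int) (hx : l.getLast? = some x) : x ≤ a := by
  induction l with
  | nil => cases ha
  | cons b t ih =>
    rcases List.mem_cons.mp ha with rfl | ha'
    · have hxmem := List.mem_of_getLast? hx
      rcases List.mem_cons.mp hxmem with rfl | hxt
      · exact le_refl _
      · exact le_of_lt ((List.pairwise_cons.mp h).1 x hxt)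
    · cases t with
      | nil => cases ha'
      | cons c u =>
        rw [List.getLast?_cons_cons] at hx
        exact ih (List.pairwise_cons.mp h).2 ha' hx

-- the single-pass collapse of a weakly decreasing list is strictly decreasing
-- and keeps exactly the members of the input
theorem collapse_inv (l : List Int) (acc : List Int)
    (hl : l.Pairwise (· ≥ ·))
    (hacc : acc.Pairwise (· > ·))
    (hlink : ∀ x, acc.getLast? = some x → ∀ y ∈ l, y ≤ x) :
    (l.foldl cstep acc).Pairwise (· > ·) ∧
    (∀ z, z ∈ l.foldl cstep acc ↔ z ∈ acc ∨ z ∈ l) := by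
  induction l generalizing acc with
  | nil => exact ⟨hacc, by simp⟩
  | cons y t ih =>
    obtain ⟨hy, ht⟩ := List.pairwise_cons.mp hl
    rw [List.foldl_cons]
    have hstep : cstep acc y = (match acc.getLast? with
      | none => acc ++ [y] | some l => if l ≠ y then acc ++ [y] else acc) := by
      simp [cstep, pyGet_neg_one]
    cases hga : acc.getLast? with
    | none =>
      have hnil : acc = [] := List.getLast?_eq_none_iff.mp hga
      subst hnil
      rw [hstep]; simp only [List.getLast?_nil, List.nil_append]
      have hres := ih ([y]) ht (by simp)
        (by intro x hx z hz; simp at hx; subst hx; exact hy z hz)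
      refine ⟨hres.1, fun z => ?_⟩
      rw [hres.2 z]; simp
    | some a =>
      have hay : y ≤ a := hlink a hga y (by simp)
      by_cases hne : a ≠ y
      · rw [hstep, hga]; simp only []; rw [if_pos hne]
        have hub : ∀ b ∈ acc, b > y := by
          intro b hb
          have h1 := last_lb acc hacc b hb a hga
          omega
        have hpw : (acc ++ [y]).Pairwise (· > ·) := by
          rw [List.pairwise_append]
          exact ⟨hacc, by simp, by intro b hb c hc; simp at hc; subst hc; exact hub b hb⟩
        have hres := ih (acc ++ [y]) ht hpw
          (by intro x hx z hz
              have hx' : x = y := by simpa using hx.symm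
              subst hx'; exact hy z hz)
        refine ⟨hres.1, fun z => ?_⟩
        rw [hres.2 z]; simp; tauto
      · rw [not_not] at hne; subst hne
        rw [hstep, hga]; simp only []; rw [if_neg (by simp)]
        have hmem : a ∈ acc := List.mem_of_getLast? hga
        have hres := ih acc ht hacc
          (by intro x hx z hz
              rw [hga] at hx; injection hx with hx; subst hx
              exact hy z hz)
        refine ⟨hres.1, fun z => ?_⟩
        rw [hres.2 z]
        constructor
        · rintro (h | h)
          · exact Or.inl h
          · exact Or.inr (List.mem_cons_of_mem _ h)
        · rintro (h | h)
          · exact Or.inl h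
          · rcases List.mem_cons.mp h with rfl | h'
            · exact Or.inl hmem
            · exact Or.inr h'

-- ===== VERDICT (by name: the statement is the Claim_ definition above) =====
theorem get_years_spec : Claim_equal_get_years := by
  intro data _ hpre
  unfold Spec_get_years get_years get_years_alt
  rw [foldA_eq data hpre, sorted_rev_eq_neg, sorted_rev_eq_neg]
  set ys := data.map extY with hys
  set s := PySem.List.sorted ys (fun x => -x) false with hs
  have hs_pw : s.Pairwise (fun a b => a ≥ b) :=
    (PySem.List.sorted_pairwise ys (fun x => -x)).imp (by intro a b h; omega)
  have hinv := collapse_inv s [] hs_pw (by simp)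
    (by intro x hx; simp at hx)
  have hc_pw := hinv.1
  have hc_mem : ∀ z, z ∈ s.foldl cstep [] ↔ z ∈ ys := by
    intro z
    rw [hinv.2 z, hs]
    simp [(PySem.List.sorted_perm ys (fun x => -x) false).mem_iff]
  have hc_nodup : (s.foldl cstep []).Nodup := hc_pw.imp (fun h => ne_of_gt h)
  have hperm : (s.foldl cstep []).Perm (PySem.Set.ofList ys) := by
    rw [List.perm_ext_iff_of_nodup hc_nodup (PySem.Set.nodup_ofList ys)]
    intro z
    rw [hc_mem z, PySem.Set.mem_ofList]
  have := PySem.List.sorted_eq_of_perm_of_pairwise_lt (PySem.Set.ofList ys)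
    (s.foldl cstep []) (fun x => -x) hperm (hc_pw.imp (by intro a b h; show -a < -b; omega))
  rw [this]
  rfl
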